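-- pv_equiv track=rewrite | github.com/comafj/CS454-Team-28-repository | Local_search.py | large_step
-- ===== SOURCE A (Python) =====
-- def rgb_boundary(value, delta):
--     if (value + delta) < 0 or (value + delta > 255):
--         return True
--     else:
--         return False
--
-- def possible_way2():
--     ret = []
--     for i in [-1, 0, 1]:
--         for j in [-1, 0, 1]:
--             for k in [-1, 0, 1]:
--                 ret.append([i, j, k])
--     return ret
--
-- def large_step(cdict, base, size):
--     dict_set = []
--     # base_vectors = possible_way(base) # Previous version
--     base_vectors = possible_way2()      # New version
--     sized_vectors = [[size*val for val in bv] for bv in base_vectors]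
--
--     red_val = cdict['red']
--     green_val = cdict['green']
--     blue_val = cdict['blue']
--
--     for sv in sized_vectors:
--         red_add = sv[0]
--         green_add = sv[1]
--         blue_add = sv[2]
--         if rgb_boundary(red_val, red_add) or rgb_boundary(green_val, green_add) or rgb_boundary(blue_val, blue_add):
--             continue
--         new_dict = {'red': red_val + red_add, 'green': green_val + green_add,
--                     'blue': blue_val + blue_add, 'alpha': cdict['alpha']}
--         dict_set.append(new_dict)
--     return dict_set
-- ===== SOURCE B (Python) =====
-- def large_step(cdict, base, size):
--     # Build the neighbor list channel by channel: start from one empty partial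
--     # assignment and, for each of red/green/blue in turn, extend every partial
--     # with each in-bounds new value for that channel; finally attach alpha.
--     partials = [[]]
--     for key in ('red', 'green', 'blue'):
--         v = cdict[key]
--         partials = [p + [(key, v + d)]
--                     for p in partials
--                     for d in (-size, 0, size)
--                     if 0 <= v + d <= 255]
--     return [dict(p, alpha=cdict['alpha']) for p in partials]
-- ===== Notes on version B (the rewrite author's own statement) =====
-- stated objective: alternative
-- what changed: B never forms the 27 delta vectors: it grows the neighbor set incrementally, starting from one empty partial assignment and extending every partial with each in-bounds value per channel (red, then green, then blue), pruning dead branches as it goes, then attaches alpha.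
import Mathlib
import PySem

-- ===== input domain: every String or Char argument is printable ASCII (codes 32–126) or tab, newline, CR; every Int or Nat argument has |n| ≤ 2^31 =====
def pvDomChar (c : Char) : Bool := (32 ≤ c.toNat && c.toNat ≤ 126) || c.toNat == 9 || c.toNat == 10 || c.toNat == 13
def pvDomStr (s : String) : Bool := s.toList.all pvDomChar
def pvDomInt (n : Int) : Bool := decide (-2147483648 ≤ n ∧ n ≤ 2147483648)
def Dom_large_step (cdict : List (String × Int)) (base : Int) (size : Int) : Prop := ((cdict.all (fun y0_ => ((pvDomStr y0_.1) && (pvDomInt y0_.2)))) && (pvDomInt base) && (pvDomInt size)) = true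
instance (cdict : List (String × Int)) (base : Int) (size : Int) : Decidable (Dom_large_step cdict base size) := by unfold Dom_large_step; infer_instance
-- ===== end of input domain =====

-- B grows the neighbor set channel by channel from one empty partial assignment,
-- pruning out-of-range extensions per channel, instead of A's generate-all-27
-- -delta-vectors-then-filter (objective: alternative decomposition; same output).

-- ===== PORT A =====
def rgb_boundary (value : Int) (delta : Int) : Bool :=
  if value + delta < 0 ∨ value + delta > 255 then true else false

def possible_way2 : List (List Int) :=
  ([-1, 0, 1] : List Int).foldl (fun ret i =>
    ([-1, 0, 1] : List Int).foldl (fun ret j =>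
      ([-1, 0, 1] : List Int).foldl (fun ret k => ret ++ [[i, j, k]]) ret) ret) []

def large_step (cdict : List (String × Int)) (base : Int) (size : Int) : List (List (String × Int)) :=
  let _ := base  -- 'base' is unused by A as well (only the commented-out previous version used it)
  match cdict.lookup "red", cdict.lookup "green", cdict.lookup "blue" with
  | some red_val, some green_val, some blue_val =>
    let base_vectors := possible_way2
    let sized_vectors := base_vectors.map (fun bv => bv.map (fun val => size * val))
    sized_vectors.foldl (fun dict_set sv =>
      -- sv[0], sv[1], sv[2]: every sv has exactly 3 entries, so the IndexError default is unreachable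
      let red_add := (PySem.List.pyGet? sv 0).getD 0
      let green_add := (PySem.List.pyGet? sv 1).getD 0
      let blue_add := (PySem.List.pyGet? sv 2).getD 0
      if rgb_boundary red_val red_add || rgb_boundary green_val green_add
          || rgb_boundary blue_val blue_add then
        dict_set
      else
        match cdict.lookup "alpha" with
        | some a =>
          dict_set ++ [[("red", red_val + red_add), ("green", green_val + green_add),
                        ("blue", blue_val + blue_add), ("alpha", a)]]
        | none => dict_set  -- KeyError in Python; excluded by Pre_
      ) []
  | _, _, _ => []             -- KeyError in Python; excluded by Pre_

-- ===== PORT B =====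
-- Source B's channel loop: extend every partial assignment with each in-bounds value
def pv_alt_loop (cdict : List (String × Int)) (size : Int)
    (keys : List String) (partials : List (List (String × Int))) : List (List (String × Int)) :=
  match keys with
  | [] => partials
  | key :: rest =>
    match cdict.lookup key with
    | none => []              -- KeyError in Python; excluded by Pre_
    | some v =>
      pv_alt_loop cdict size rest
        (partials.flatMap (fun p =>
          ((([-size, 0, size] : List Int).filter
              (fun d => decide (0 ≤ v + d) && decide (v + d ≤ 255))).map
            (fun d => p ++ [(key, v + d)]))))

def large_step_alt (cdict : List (String × Int)) (base : Int) (size : Int) : List (List (String × Int)) :=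
  let _ := base
  let partials := pv_alt_loop cdict size ["red", "green", "blue"] [[]]
  partials.map (fun p =>
    -- dict(p, alpha=cdict['alpha']): alpha read per emitted dict, as in Source B
    match cdict.lookup "alpha" with
    | some a => p ++ [("alpha", a)]
    | none => [])             -- KeyError in Python; excluded by Pre_

-- ===== PRECONDITION & SPEC =====
-- true iff channel value v admits at least one in-bounds delta among -size, 0, size
def pv_valid (v : Int) (size : Int) : Bool :=
  (decide (0 ≤ v - size) && decide (v - size ≤ 255)) ||
  (decide (0 ≤ v) && decide (v ≤ 255)) ||
  (decide (0 ≤ v + size) && decide (v + size ≤ 255))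

-- Exactly the inputs on which Python A returns: the red, green and blue keys present, and
-- the alpha key present unless no neighbour survives the bounds check (then A returns the
-- empty list before ever reading alpha); everywhere else A raises KeyError.
def Pre_large_step (cdict : List (String × Int)) (base : Int) (size : Int) : Prop :=
  ((cdict.lookup "red").isSome && (cdict.lookup "green").isSome && (cdict.lookup "blue").isSome &&
   ((cdict.lookup "alpha").isSome ||
    !(pv_valid ((cdict.lookup "red").getD 0) size && pv_valid ((cdict.lookup "green").getD 0) size &&
      pv_valid ((cdict.lookup "blue").getD 0) size))) = true
instance (cdict : List (String × Int)) (base : Int) (size : Int) : Decidable (Pre_large_step cdict base size) := by unfold Pre_large_step; infer_instance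
def pvWitness_large_step : (List (String × Int)) × Int × Int :=
  ([("red", 10), ("green", 200), ("blue", 254), ("alpha", 255)], 0, 5)

def Spec_large_step (cdict : List (String × Int)) (base : Int) (size : Int) (out : List (List (String × Int))) : Prop := out = large_step_alt cdict base size
instance (cdict : List (String × Int)) (base : Int) (size : Int) (out : List (List (String × Int))) : Decidable (Spec_large_step cdict base size out) := by unfold Spec_large_step; infer_instance

-- ===== CLAIM (what is proved, stated in full; the proofs are below) =====
def Claim_equal_large_step : Prop := ∀ (cdict : List (String × Int)) (base : Int) (size : Int), Dom_large_step cdict base size → Pre_large_step cdict base size → Spec_large_step cdict base size (large_step cdict base size)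

-- ===== LEMMAS AND PROOFS =====

-- A's loop body (alpha already resolved to a), named so the lemmas below can speak about it
def pv_body (r g b a : Int) (dict_set : List (List (String × Int))) (sv : List Int) :
    List (List (String × Int)) :=
  if (rgb_boundary r ((PySem.List.pyGet? sv 0).getD 0) || rgb_boundary g ((PySem.List.pyGet? sv 1).getD 0) ||
      rgb_boundary b ((PySem.List.pyGet? sv 2).getD 0)) = true then
    dict_set
  else
    dict_set ++
      [[("red", r + (PySem.List.pyGet? sv 0).getD 0), ("green", g + (PySem.List.pyGet? sv 1).getD 0),
          ("blue", b + (PySem.List.pyGet? sv 2).getD 0), ("alpha", a)]]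

-- boundary test vs B's in-range test, pointwise
theorem pv_cond (v d : Int) :
    (decide (0 ≤ v + d) && decide (v + d ≤ 255)) = !rgb_boundary v d := by
  unfold rgb_boundary
  by_cases h1 : (0 : Int) ≤ v + d <;> by_cases h2 : v + d ≤ (255 : Int) <;>
    simp [h1, h2] <;> omega

theorem pv_fold3 (r g b a i j : Int) (l3 : List Int) (acc : List (List (String × Int))) :
    List.foldl (pv_body r g b a) acc (l3.map fun k => [i, j, k]) =
      acc ++ if rgb_boundary r i || rgb_boundary g j then []
             else (l3.filter fun d => !rgb_boundary b d).map
               (fun k => [("red", r + i), ("green", g + j), ("blue", b + k), ("alpha", a)]) := by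
  induction l3 generalizing acc with
  | nil => cases h : (rgb_boundary r i || rgb_boundary g j) <;> simp
  | cons k l3 ih =>
    have e0 : (PySem.List.pyGet? [i, j, k] (0 : Int)).getD 0 = i := rfl
    have e1 : (PySem.List.pyGet? [i, j, k] (1 : Int)).getD 0 = j := rfl
    have e2 : (PySem.List.pyGet? [i, j, k] (2 : Int)).getD 0 = k := rfl
    cases h12 : (rgb_boundary r i || rgb_boundary g j) <;>
      cases h3 : rgb_boundary b k <;>
        simp [pv_body, h12, h3, ih]

theorem pv_fold2 (r g b a i : Int) (l2 l3 : List Int) (acc : List (List (String × Int))) :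
    List.foldl (pv_body r g b a) acc (l2.flatMap fun j => l3.map fun k => [i, j, k]) =
      acc ++ if rgb_boundary r i then []
             else (l2.filter fun d => !rgb_boundary g d).flatMap
               (fun j => (l3.filter fun d => !rgb_boundary b d).map
                 (fun k => [("red", r + i), ("green", g + j), ("blue", b + k), ("alpha", a)])) := by
  induction l2 generalizing acc with
  | nil => cases h : rgb_boundary r i <;> simp
  | cons j l2 ih =>
    rw [List.flatMap_cons, List.foldl_append, pv_fold3, ih]
    cases h1 : rgb_boundary r i <;> cases h2 : rgb_boundary g j <;>
      simp [h2, List.append_assoc]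

theorem pv_fold1 (r g b a : Int) (l1 l2 l3 : List Int) (acc : List (List (String × Int))) :
    List.foldl (pv_body r g b a) acc
        (l1.flatMap fun i => l2.flatMap fun j => l3.map fun k => [i, j, k]) =
      acc ++ (l1.filter fun d => !rgb_boundary r d).flatMap
        (fun i => (l2.filter fun d => !rgb_boundary g d).flatMap
          (fun j => (l3.filter fun d => !rgb_boundary b d).map
            (fun k => [("red", r + i), ("green", g + j), ("blue", b + k), ("alpha", a)]))) := by
  induction l1 generalizing acc with
  | nil => simp
  | cons i l1 ih =>
    rw [List.flatMap_cons, List.foldl_append, pv_fold2, ih]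
    cases h1 : rgb_boundary r i <;> simp [h1, List.append_assoc]

theorem pv_vectors (size : Int) :
    possible_way2.map (fun bv => bv.map (fun val => size * val)) =
      ([-size, 0, size] : List Int).flatMap
        (fun i => ([-size, 0, size] : List Int).flatMap
          (fun j => ([-size, 0, size] : List Int).map (fun k => [i, j, k]))) := by
  simp [possible_way2, mul_zero, mul_one]

theorem pv_foldl_id {α β : Type} (l : List β) (acc : α) :
    List.foldl (fun (ds : α) (_ : β) => ds) acc l = acc := by
  induction l <;> simp [*]

theorem pv_filter_empty (v size : Int) (h : pv_valid v size = false) :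
    ([-size, 0, size] : List Int).filter
        (fun d => decide (0 ≤ v + d) && decide (v + d ≤ 255)) = [] := by
  simp only [pv_valid, Bool.or_eq_false_iff, Bool.and_eq_false_iff,
    decide_eq_false_iff_not, not_le] at h
  simp only [List.filter_cons, List.filter_nil]
  split_ifs with h1 h2 h3 <;> simp_all <;> omega


theorem pv_flatMap_empty {α β : Type} (l : List α) :
    List.flatMap (fun _ => ([] : List β)) l = [] := by
  induction l <;> simp [*]

theorem pv_alt_loop_nil (cdict : List (String × Int)) (size : Int) (keys : List String) :
    pv_alt_loop cdict size keys [] = [] := by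
  induction keys with
  | nil => rfl
  | cons k rest ih =>
    unfold pv_alt_loop
    cases cdict.lookup k <;> simp [ih]

theorem pv_staged (fr fg fb : List Int) (r g b a : Int) :
    List.flatMap
      (fun i => List.flatMap
          (fun j => List.map (fun k => [("red", r + i), ("green", g + j), ("blue", b + k), ("alpha", a)]) fb) fg) fr =
    List.map (fun p => p ++ [("alpha", a)])
      (List.flatMap (fun p => List.map (fun d => p ++ [("blue", b + d)]) fb)
        (List.flatMap (fun p => List.map (fun d => p ++ [("green", g + d)]) fg)
          (List.map (fun d => [("red", r + d)]) fr))) := by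
  rw [List.map_flatMap, List.flatMap_assoc, List.flatMap_map]
  simp only [List.flatMap_map, List.map_map, Function.comp_def, List.nil_append,
    List.cons_append]

-- ===== VERDICT (by name: the statement is the Claim_ definition above) =====
theorem large_step_spec : Claim_equal_large_step := by
  intro cdict base size _ hpre
  unfold Pre_large_step at hpre
  simp only [Bool.and_eq_true, Bool.or_eq_true] at hpre
  obtain ⟨⟨⟨h1, h2⟩, h3⟩, h4⟩ := hpre
  rw [Option.isSome_iff_exists] at h1 h2 h3
  obtain ⟨r, hr⟩ := h1; obtain ⟨g, hg⟩ := h2; obtain ⟨b, hb⟩ := h3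
  unfold Spec_large_step large_step large_step_alt
  cases ha : cdict.lookup "alpha" with
  | some a =>
    simp only [hr, hg, hb, ha]
    rw [show (List.map (fun bv => List.map (fun val => size * val) bv) possible_way2) =
          possible_way2.map (fun bv => bv.map (fun val => size * val)) from rfl,
        pv_vectors]
    rw [show (fun (dict_set : List (List (String × Int))) (sv : List Int) =>
          if (rgb_boundary r ((PySem.List.pyGet? sv 0).getD 0) || rgb_boundary g ((PySem.List.pyGet? sv 1).getD 0) ||
              rgb_boundary b ((PySem.List.pyGet? sv 2).getD 0)) = true then
            dict_set
          else
            dict_set ++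
              [[("red", r + (PySem.List.pyGet? sv 0).getD 0), ("green", g + (PySem.List.pyGet? sv 1).getD 0),
                  ("blue", b + (PySem.List.pyGet? sv 2).getD 0), ("alpha", a)]]) = pv_body r g b a from rfl]
    rw [pv_fold1]
    simp only [pv_alt_loop, hr, hg, hb, pv_cond, List.nil_append, List.flatMap_cons,
      List.flatMap_nil, List.append_nil]
    exact pv_staged _ _ _ r g b a
  | none =>
    rcases h4 with h4 | h4
    · rw [ha] at h4; simp at h4
    · rw [hr, hg, hb] at h4
      simp only [Option.getD_some, Bool.not_eq_eq_eq_not, Bool.not_true,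
        Bool.and_eq_false_iff] at h4
      simp only [hr, hg, hb, ha, ite_self]
      rw [pv_foldl_id]
      rcases h4 with (h | h) | h
      · simp only [pv_alt_loop, hr, hg, hb, pv_filter_empty r size h]
        simp [pv_alt_loop_nil, pv_flatMap_empty]
      · simp only [pv_alt_loop, hr, hg, hb, pv_filter_empty g size h]
        simp [pv_alt_loop_nil, pv_flatMap_empty]
      · simp only [pv_alt_loop, hr, hg, hb, pv_filter_empty b size h]
        simp [pv_alt_loop_nil, pv_flatMap_empty]
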